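-- pv_equiv track=rewrite | github.com/Bilmem2/ACMG_Assistant | ACMG_assessor_EN v1.py | classify_variant
-- ===== SOURCE A (Python) =====
-- def classify_variant(evidence, use_acmg_2023=False):
--     """Classify the variant based on ACMG criteria."""
--     pvs_count = sum(1 for e in evidence if e == 'PVS1')
--     ps_count = sum(1 for e in evidence if e.startswith('PS') and e != 'PS2_Very_Strong')
--     ps_very_strong_count = sum(1 for e in evidence if e == 'PS2_Very_Strong')
--     pm_count = sum(1 for e in evidence if e.startswith('PM'))
--     pp_count = sum(1 for e in evidence if e.startswith('PP'))
--     ba_count = sum(1 for e in evidence if e == 'BA1')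
--     bs_count = sum(1 for e in evidence if e.startswith('BS'))
--     bp_count = sum(1 for e in evidence if e.startswith('BP'))
--
--     if use_acmg_2023:
--         if ba_count >= 1:
--             return 'Benign', evidence
--         elif bs_count >= 2:
--             return 'Benign', evidence
--         elif bs_count == 1 and bp_count >= 1:
--             return 'Likely Benign', evidence
--         elif (pvs_count >= 1 and (ps_count >= 1 or ps_very_strong_count >= 1)) or \
--              (ps_very_strong_count >= 1 and pm_count >= 1) or \
--              (ps_count >= 2) or \
--              (ps_count >= 1 and pm_count >= 3) or \
--              (pm_count >= 4):
--             return 'Pathogenic', evidence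
--         elif (ps_count == 1 and pm_count >= 1) or \
--              (ps_count == 1 and pp_count >= 2) or \
--              (pm_count >= 3) or \
--              (pm_count >= 2 and pp_count >= 2):
--             return 'Likely Pathogenic', evidence
--         else:
--             return 'Variant of Uncertain Significance (VUS)', evidence
--     else:
--         if ba_count >= 1:
--             return 'Benign', evidence
--         elif bs_count >= 2:
--             return 'Benign', evidence
--         elif bs_count == 1 and bp_count >= 1:
--             return 'Likely Benign', evidence
--         elif (pvs_count >= 1 and ps_count >= 1) or \
--              (pvs_count >= 1 and pm_count >= 2) or \
--              (ps_count >= 2) or \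
--              (ps_count >= 1 and pm_count >= 3) or \
--              (pm_count >= 4):
--             return 'Pathogenic', evidence
--         elif (ps_count == 1 and pm_count >= 1) or \
--              (ps_count == 1 and pp_count >= 2) or \
--              (pm_count >= 3) or \
--              (pm_count >= 2 and pp_count >= 2):
--             return 'Likely Pathogenic', evidence
--         else:
--             return 'Variant of Uncertain Significance (VUS)', evidence
-- ===== SOURCE B (Python) =====
-- def _category(e):
--     """Map an evidence code to its single (mutually exclusive) ACMG category tag, or None."""
--     if e == 'PVS1':
--         return 'PVS1'
--     if e == 'PS2_Very_Strong':
--         return 'PS2VS'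
--     if e == 'BA1':
--         return 'BA1'
--     p = e[:2]
--     return p if p in ('PS', 'PM', 'PP', 'BS', 'BP') else None
--
--
-- def classify_variant(evidence, use_acmg_2023=False):
--     """Classify the variant based on ACMG criteria.
--
--     Each evidence code falls in exactly one category (the startswith tests of the
--     spec are mutually exclusive), so we tag each element once and tally the tags
--     in a dict, then run one factored decision tree.
--     """
--     counts = {}
--     for e in evidence:
--         tag = _category(e)
--         if tag is not None:
--             counts[tag] = counts.get(tag, 0) + 1
--     pvs = counts.get('PVS1', 0)
--     ps = counts.get('PS', 0)
--     psvs = counts.get('PS2VS', 0)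
--     pm = counts.get('PM', 0)
--     pp = counts.get('PP', 0)
--     ba = counts.get('BA1', 0)
--     bs = counts.get('BS', 0)
--     bp = counts.get('BP', 0)
--     if ba >= 1 or bs >= 2:
--         label = 'Benign'
--     elif bs == 1 and bp >= 1:
--         label = 'Likely Benign'
--     else:
--         if use_acmg_2023:
--             strong_combo = (pvs >= 1 and (ps >= 1 or psvs >= 1)) or (psvs >= 1 and pm >= 1)
--         else:
--             strong_combo = (pvs >= 1 and ps >= 1) or (pvs >= 1 and pm >= 2)
--         if strong_combo or ps >= 2 or (ps >= 1 and pm >= 3) or pm >= 4: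
--             label = 'Pathogenic'
--         elif (ps == 1 and pm >= 1) or (ps == 1 and pp >= 2) or pm >= 3 or (pm >= 2 and pp >= 2):
--             label = 'Likely Pathogenic'
--         else:
--             label = 'Variant of Uncertain Significance (VUS)'
--     return label, evidence
-- ===== Notes on version B (the rewrite author's own statement) =====
-- stated objective: faster
-- what changed: B exploits that A's eight overlapping-looking predicates are in fact mutually exclusive: it tags each element with a single category (via its two-char prefix plus three exact-match specials) and tallies the tags in one dict in a single pass, then runs one factored decision tree instead of A's eight generator passes and two duplicated trees.
import Mathlib
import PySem

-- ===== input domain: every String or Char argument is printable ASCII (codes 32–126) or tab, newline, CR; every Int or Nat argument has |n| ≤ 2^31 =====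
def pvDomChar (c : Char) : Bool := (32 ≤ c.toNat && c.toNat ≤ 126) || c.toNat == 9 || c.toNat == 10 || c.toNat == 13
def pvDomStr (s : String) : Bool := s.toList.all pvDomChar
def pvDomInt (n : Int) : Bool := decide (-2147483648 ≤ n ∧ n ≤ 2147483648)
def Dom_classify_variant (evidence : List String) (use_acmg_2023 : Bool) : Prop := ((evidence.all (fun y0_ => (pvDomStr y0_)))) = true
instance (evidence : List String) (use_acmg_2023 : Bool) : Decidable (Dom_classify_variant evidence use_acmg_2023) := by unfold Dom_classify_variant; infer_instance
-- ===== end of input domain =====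

-- B tags each element with a single mutually-exclusive category (two-char prefix + three exact specials) and tallies tags in one dict, instead of A's eight separate counting passes and two duplicated decision trees.


-- ===== PORT A =====
def classify_variant (evidence : List String) (use_acmg_2023 : Bool) : String × List String :=
  let pvs_count : Int := evidence.foldl (fun acc e => if e == "PVS1" then acc + 1 else acc) 0
  let ps_count : Int := evidence.foldl (fun acc e => if PySem.Str.startswith e "PS" && e != "PS2_Very_Strong" then acc + 1 else acc) 0
  let ps_very_strong_count : Int := evidence.foldl (fun acc e => if e == "PS2_Very_Strong" then acc + 1 else acc) 0
  let pm_count : Int := evidence.foldl (fun acc e => if PySem.Str.startswith e "PM" then acc + 1 else acc) 0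
  let pp_count : Int := evidence.foldl (fun acc e => if PySem.Str.startswith e "PP" then acc + 1 else acc) 0
  let ba_count : Int := evidence.foldl (fun acc e => if e == "BA1" then acc + 1 else acc) 0
  let bs_count : Int := evidence.foldl (fun acc e => if PySem.Str.startswith e "BS" then acc + 1 else acc) 0
  let bp_count : Int := evidence.foldl (fun acc e => if PySem.Str.startswith e "BP" then acc + 1 else acc) 0
  if use_acmg_2023 then
    if ba_count ≥ 1 then ("Benign", evidence)
    else if bs_count ≥ 2 then ("Benign", evidence)
    else if bs_count = 1 ∧ bp_count ≥ 1 then ("Likely Benign", evidence)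
    else if (pvs_count ≥ 1 ∧ (ps_count ≥ 1 ∨ ps_very_strong_count ≥ 1)) ∨
            (ps_very_strong_count ≥ 1 ∧ pm_count ≥ 1) ∨
            (ps_count ≥ 2) ∨
            (ps_count ≥ 1 ∧ pm_count ≥ 3) ∨
            (pm_count ≥ 4) then ("Pathogenic", evidence)
    else if (ps_count = 1 ∧ pm_count ≥ 1) ∨
            (ps_count = 1 ∧ pp_count ≥ 2) ∨
            (pm_count ≥ 3) ∨
            (pm_count ≥ 2 ∧ pp_count ≥ 2) then ("Likely Pathogenic", evidence)
    else ("Variant of Uncertain Significance (VUS)", evidence)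
  else
    if ba_count ≥ 1 then ("Benign", evidence)
    else if bs_count ≥ 2 then ("Benign", evidence)
    else if bs_count = 1 ∧ bp_count ≥ 1 then ("Likely Benign", evidence)
    else if (pvs_count ≥ 1 ∧ ps_count ≥ 1) ∨
            (pvs_count ≥ 1 ∧ pm_count ≥ 2) ∨
            (ps_count ≥ 2) ∨
            (ps_count ≥ 1 ∧ pm_count ≥ 3) ∨
            (pm_count ≥ 4) then ("Pathogenic", evidence)
    else if (ps_count = 1 ∧ pm_count ≥ 1) ∨
            (ps_count = 1 ∧ pp_count ≥ 2) ∨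
            (pm_count ≥ 3) ∨
            (pm_count ≥ 2 ∧ pp_count ≥ 2) then ("Likely Pathogenic", evidence)
    else ("Variant of Uncertain Significance (VUS)", evidence)

-- ===== PORT B =====
-- B: each evidence code belongs to exactly one category; tag it once, tally tags in a dict.
def cvCategory (e : String) : Option String :=
  if e == "PVS1" then some "PVS1"
  else if e == "PS2_Very_Strong" then some "PS2VS"
  else if e == "BA1" then some "BA1"
  else
    let p := PySem.Str.slice e (some 0) (some 2)
    if p == "PS" || p == "PM" || p == "PP" || p == "BS" || p == "BP" then some p else none

def classify_variant_alt (evidence : List String) (use_acmg_2023 : Bool) : String × List String :=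
  let counts : PySem.Dict String Int :=
    evidence.foldl (fun d e =>
      match cvCategory e with
      | some tag => d.insert tag (d.getD tag 0 + 1)
      | none => d) PySem.Dict.empty
  let pvs := counts.getD "PVS1" 0
  let ps := counts.getD "PS" 0
  let psvs := counts.getD "PS2VS" 0
  let pm := counts.getD "PM" 0
  let pp := counts.getD "PP" 0
  let ba := counts.getD "BA1" 0
  let bs := counts.getD "BS" 0
  let bp := counts.getD "BP" 0
  let label :=
    if ba ≥ 1 ∨ bs ≥ 2 then "Benign"
    else if bs = 1 ∧ bp ≥ 1 then "Likely Benign"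
    else
      let strong_combo :=
        if use_acmg_2023 then (pvs ≥ 1 ∧ (ps ≥ 1 ∨ psvs ≥ 1)) ∨ (psvs ≥ 1 ∧ pm ≥ 1)
        else (pvs ≥ 1 ∧ ps ≥ 1) ∨ (pvs ≥ 1 ∧ pm ≥ 2)
      if strong_combo ∨ ps ≥ 2 ∨ (ps ≥ 1 ∧ pm ≥ 3) ∨ pm ≥ 4 then "Pathogenic"
      else if (ps = 1 ∧ pm ≥ 1) ∨ (ps = 1 ∧ pp ≥ 2) ∨ pm ≥ 3 ∨ (pm ≥ 2 ∧ pp ≥ 2) then "Likely Pathogenic"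
      else "Variant of Uncertain Significance (VUS)"
  (label, evidence)

-- ===== PRECONDITION & SPEC =====
def Spec_classify_variant (evidence : List String) (use_acmg_2023 : Bool) (out : String × List String) : Prop := out = classify_variant_alt evidence use_acmg_2023
instance (evidence : List String) (use_acmg_2023 : Bool) (out : String × List String) : Decidable (Spec_classify_variant evidence use_acmg_2023 out) := by unfold Spec_classify_variant; infer_instance

-- ===== CLAIM (what is proved, stated in full; the proofs are below) =====
def Claim_equal_classify_variant : Prop := ∀ (evidence : List String) (use_acmg_2023 : Bool), Dom_classify_variant evidence use_acmg_2023 → Spec_classify_variant evidence use_acmg_2023 (classify_variant evidence use_acmg_2023)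

-- ===== LEMMAS AND PROOFS =====

-- e[0:2] is take 2.
theorem slice_two_cv (e : String) :
    (PySem.Str.slice e (some 0) (some 2)).toList = e.toList.take 2 := by
  simp
  rw [PySem.List.slice_to e.toList (by norm_num : (0:Int) ≤ 2)]; rfl

theorem slice_eq_cv (e q : String) (c1 c2 : Char) (hq : q.toList = [c1, c2]) :
    (PySem.Str.slice e (some 0) (some 2) = q) ↔ (e.toList.take 2 = [c1, c2]) := by
  rw [← String.toList_inj, slice_two_cv, hq]

-- startswith with a two-character prefix is equality of the first two characters.
theorem startswith_two_cv (e p : String) (c1 c2 : Char) (hp : p.toList = [c1, c2]) :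
    PySem.Str.startswith e p = (e.toList.take 2 == [c1, c2]) := by
  rw [Bool.eq_iff_iff]
  simp only [PySem.Str.startswith_eq, beq_iff_eq, hp]
  rw [PySem.Chars.startswith_iff]
  constructor
  · intro h
    have := List.prefix_iff_eq_take.mp h
    simpa using this.symm
  · intro h
    exact List.prefix_iff_eq_take.mpr (by simpa using h.symm)

-- Characterization of the category tag by the first two characters.
theorem cvCategory_eq (e : String) :
    cvCategory e =
      if e = "PVS1" then some "PVS1"
      else if e = "PS2_Very_Strong" then some "PS2VS"
      else if e = "BA1" then some "BA1"
      else if e.toList.take 2 = ['P','S'] then some "PS"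
      else if e.toList.take 2 = ['P','M'] then some "PM"
      else if e.toList.take 2 = ['P','P'] then some "PP"
      else if e.toList.take 2 = ['B','S'] then some "BS"
      else if e.toList.take 2 = ['B','P'] then some "BP"
      else none := by
  unfold cvCategory
  simp only [beq_iff_eq]
  by_cases h1 : e = "PVS1"
  · simp [h1]
  · by_cases h2 : e = "PS2_Very_Strong"
    · simp [h2]
    · by_cases h3 : e = "BA1"
      · simp [h3]
      · simp only [h1, h2, h3, if_false]
        by_cases hPS : e.toList.take 2 = ['P','S']
        · have : PySem.Str.slice e (some 0) (some 2) = "PS" := (slice_eq_cv e "PS" 'P' 'S' rfl).mpr hPS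
          simp [this, hPS]
        · by_cases hPM : e.toList.take 2 = ['P','M']
          · have : PySem.Str.slice e (some 0) (some 2) = "PM" := (slice_eq_cv e "PM" 'P' 'M' rfl).mpr hPM
            simp [this, hPM]
          · by_cases hPP : e.toList.take 2 = ['P','P']
            · have : PySem.Str.slice e (some 0) (some 2) = "PP" := (slice_eq_cv e "PP" 'P' 'P' rfl).mpr hPP
              simp [this, hPP]
            · by_cases hBS : e.toList.take 2 = ['B','S']
              · have : PySem.Str.slice e (some 0) (some 2) = "BS" := (slice_eq_cv e "BS" 'B' 'S' rfl).mpr hBS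
                simp [this, hBS]
              · by_cases hBP : e.toList.take 2 = ['B','P']
                · have : PySem.Str.slice e (some 0) (some 2) = "BP" := (slice_eq_cv e "BP" 'B' 'P' rfl).mpr hBP
                  simp [this, hBP]
                · have h4 : ∀ q : String, ∀ c1 c2 : Char, q.toList = [c1,c2] →
                      e.toList.take 2 ≠ [c1,c2] → PySem.Str.slice e (some 0) (some 2) ≠ q := by
                    intro q c1 c2 hq hne hcontra
                    exact hne ((slice_eq_cv e q c1 c2 hq).mp hcontra)
                  simp [h4 "PS" 'P' 'S' rfl hPS, h4 "PM" 'P' 'M' rfl hPM, h4 "PP" 'P' 'P' rfl hPP,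
                        h4 "BS" 'B' 'S' rfl hBS, h4 "BP" 'B' 'P' rfl hBP, hPS, hPM, hPP, hBS, hBP]

-- B's tally dict at any key equals the number of elements whose category is that key.
theorem cvTally_getD (l : List String) (d : PySem.Dict String Int) (k : String) :
    (l.foldl (fun d e =>
      match cvCategory e with
      | some tag => d.insert tag (d.getD tag 0 + 1)
      | none => d) d).getD k 0 =
    d.getD k 0 + l.countP (fun e => cvCategory e == some k) := by
  induction l generalizing d with
  | nil => simp
  | cons e rest ih =>
      simp only [List.foldl_cons, List.countP_cons]
      cases h : cvCategory e with
      | none =>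
          rw [ih]
          simp
      | some tag =>
          rw [ih, PySem.Dict.getD_insert]
          by_cases hk : k = tag
          · simp only [hk, beq_iff_eq]
            simp
            omega
          · simp only [if_neg hk, beq_iff_eq]
            simp [Ne.symm hk]

-- A's counting fold is countP.
theorem count_fold_eq_countP (l : List String) (p : String → Bool) (n : Int) :
    l.foldl (fun acc e => if p e then acc + 1 else acc) n = n + l.countP p := by
  induction l generalizing n with
  | nil => simp
  | cons e rest ih =>
      simp only [List.foldl_cons, List.countP_cons]
      by_cases h : p e <;> simp [h, ih]; ring

-- The eight tag-counts equal A's eight predicate counts.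
theorem countP_PVS1 (l : List String) :
    l.countP (fun e => cvCategory e == some "PVS1") = l.countP (fun e => e == "PVS1") := by
  apply List.countP_congr
  intro e _
  rw [cvCategory_eq]
  split_ifs <;> simp_all

theorem countP_PSVS (l : List String) :
    l.countP (fun e => cvCategory e == some "PS2VS") = l.countP (fun e => e == "PS2_Very_Strong") := by
  apply List.countP_congr
  intro e _
  rw [cvCategory_eq]
  split_ifs <;> simp_all

theorem countP_BA1 (l : List String) :
    l.countP (fun e => cvCategory e == some "BA1") = l.countP (fun e => e == "BA1") := by
  apply List.countP_congr
  intro e _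
  rw [cvCategory_eq]
  split_ifs <;> simp_all

theorem countP_PS (l : List String) :
    l.countP (fun e => cvCategory e == some "PS") =
      l.countP (fun e => PySem.Str.startswith e "PS" && e != "PS2_Very_Strong") := by
  apply List.countP_congr
  intro e _
  rw [cvCategory_eq, startswith_two_cv e "PS" 'P' 'S' rfl]
  split_ifs <;> simp_all

theorem countP_PM (l : List String) :
    l.countP (fun e => cvCategory e == some "PM") =
      l.countP (fun e => PySem.Str.startswith e "PM") := by
  apply List.countP_congr
  intro e _
  rw [cvCategory_eq, startswith_two_cv e "PM" 'P' 'M' rfl]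
  split_ifs <;> simp_all

theorem countP_PP (l : List String) :
    l.countP (fun e => cvCategory e == some "PP") =
      l.countP (fun e => PySem.Str.startswith e "PP") := by
  apply List.countP_congr
  intro e _
  rw [cvCategory_eq, startswith_two_cv e "PP" 'P' 'P' rfl]
  split_ifs <;> simp_all

theorem countP_BS (l : List String) :
    l.countP (fun e => cvCategory e == some "BS") =
      l.countP (fun e => PySem.Str.startswith e "BS") := by
  apply List.countP_congr
  intro e _
  rw [cvCategory_eq, startswith_two_cv e "BS" 'B' 'S' rfl]
  split_ifs <;> simp_all

theorem countP_BP (l : List String) :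
    l.countP (fun e => cvCategory e == some "BP") =
      l.countP (fun e => PySem.Str.startswith e "BP") := by
  apply List.countP_congr
  intro e _
  rw [cvCategory_eq, startswith_two_cv e "BP" 'B' 'P' rfl]
  split_ifs <;> simp_all

-- ===== VERDICT (by name: the statement is the Claim_ definition above) =====
theorem classify_variant_spec : Claim_equal_classify_variant := by
  intro evidence b _
  show classify_variant evidence b = classify_variant_alt evidence b
  unfold classify_variant classify_variant_alt
  simp only [cvTally_getD, PySem.Dict.getD_empty, count_fold_eq_countP, zero_add,
    countP_PVS1, countP_PSVS, countP_BA1, countP_PS, countP_PM, countP_PP, countP_BS, countP_BP]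
  cases b <;> simp only [Bool.false_eq_true, if_true, if_false] <;>
    split_ifs <;> first | rfl | omega
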